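-- pv_equiv track=rewrite | github.com/Igorok/algorithms-js | leetcode/medium/3567_minAbsDiff.py | minAbsDiff
-- ===== SOURCE A (Python) =====
-- from typing import List
--
-- def minAbsDiff(grid: List[List[int]], k: int) -> List[List[int]]:
--     N = len(grid)
--     M = len(grid[0])
--
--     res = []
--
--     for row in range(N-k+1):
--         res.append([])
--
--         for col in range(M-k+1):
--             if k == 1:
--                 res[row].append(0)
--                 continue
--
--             unique = set()
--             for i in range(k):
--                 for j in range(k):
--                     unique.add(grid[row+i][col+j])
--
--             if len(unique) == 1:
--                 res[row].append(0)
--                 continue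
--
--             unique = sorted(unique)
--             val = float('inf')
--
--
--             for i in range(1, len(unique)):
--                 val = min(val, unique[i] - unique[i-1])
--
--             res[row].append(val)
--
--
--     return res
-- ===== SOURCE B (Python) =====
-- from typing import List
--
-- def minAbsDiff(grid: List[List[int]], k: int) -> List[List[int]]:
--     N = len(grid)
--     M = len(grid[0])
--
--     def cell(r, c):
--         vals = [x for i in range(k) for x in grid[r + i][c:c + k]]
--         best = None
--         rest = vals
--         while rest:
--             v, rest = rest[0], rest[1:]
--             for u in rest:
--                 if u != v:
--                     d = abs(u - v)
--                     if best is None or d < best: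
--                         best = d
--         return 0 if best is None else best
--
--     return [[cell(r, c) for c in range(M - k + 1)] for r in range(N - k + 1)]
-- ===== Notes on version B (the rewrite author's own statement) =====
-- stated objective: alternative
-- what changed: B never builds a set and never sorts: each window is gathered by row slices into one list and its minimum difference is found by an exhaustive pairwise scan keeping a running best over all differing value pairs, replacing A's dedup-sort-adjacent-gap pipeline (whose k==1 and all-equal special cases disappear); the trade is O(k^4) pair comparisons per window against A's O(k^2 log k) sort.
-- outside the precondition, e.g. on minAbsDiff([[1]], 0): A returns [[inf, inf], [inf, inf]], B returns [[0, 0], [0, 0]]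
import Mathlib
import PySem

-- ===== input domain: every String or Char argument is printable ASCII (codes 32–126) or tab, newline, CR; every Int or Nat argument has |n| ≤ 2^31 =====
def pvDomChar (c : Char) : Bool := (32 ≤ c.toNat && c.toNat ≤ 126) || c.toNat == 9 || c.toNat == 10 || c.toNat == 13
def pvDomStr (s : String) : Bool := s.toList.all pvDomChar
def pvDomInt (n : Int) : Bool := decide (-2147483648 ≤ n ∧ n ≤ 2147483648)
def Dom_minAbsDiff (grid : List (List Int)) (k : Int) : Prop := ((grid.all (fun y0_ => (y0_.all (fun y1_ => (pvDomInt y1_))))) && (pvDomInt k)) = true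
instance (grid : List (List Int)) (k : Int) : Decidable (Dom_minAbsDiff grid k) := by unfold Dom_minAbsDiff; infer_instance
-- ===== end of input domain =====

-- B replaces A's per-window set/sort/adjacent-gap pipeline by an exhaustive pairwise scan with a
-- running minimum over all differing value pairs (alternative algorithm; no sorting, no dedup).


-- ===== PORT A =====
-- float('inf') is modeled as 2^62: exact here because Pre_ guarantees the min-loop is nonempty
-- and Dom_ bounds every grid entry by 2^31, so every real difference is < 2^62.
def minAbsDiff (grid : List (List Int)) (k : Int) : List (List Int) :=
  let N : Int := PySem.List.len grid
  let M : Int := PySem.List.len (PySem.List.pyGetD grid 0 [])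
  (PySem.List.pyRange 0 (N - k + 1) 1).foldl (fun res row =>
    res ++ [((PySem.List.pyRange 0 (M - k + 1) 1).foldl (fun cur col =>
      if k = 1 then cur ++ [0]
      else
        let unique : PySem.Set Int :=
          (PySem.List.pyRange 0 k 1).foldl (fun u i =>
            (PySem.List.pyRange 0 k 1).foldl (fun u j =>
              PySem.Set.add u (PySem.List.pyGetD (PySem.List.pyGetD grid (row + i) []) (col + j) 0)) u)
            PySem.Set.empty
        if PySem.Set.len unique = 1 then cur ++ [0]
        else
          let uniqueS := PySem.List.sorted unique (fun x => x) false
          let val := (PySem.List.pyRange 1 (PySem.List.len uniqueS) 1).foldl (fun v i =>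
            min v (PySem.List.pyGetD uniqueS i 0 - PySem.List.pyGetD uniqueS (i - 1) 0))
            4611686018427387904
          cur ++ [val]) [])]) []

-- ===== PORT B =====
-- 'best is None or d < best' running minimum over the pairs (v, u) with u after v in vals
def pvOptMin (b : Option Int) (d : Int) : Option Int :=
  match b with
  | none => some d
  | some m => if d < m then some d else some m

-- the 'while rest: v, rest = rest[0], rest[1:]; for u in rest: …' loop of Source B's cell
def pvPairLoop : List Int → Option Int → Option Int
  | [], best => best
  | v :: rest, best =>
      pvPairLoop rest (rest.foldl (fun b u => if u ≠ v then pvOptMin b |u - v| else b) best)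

def pvCell (grid : List (List Int)) (k : Int) (r : Int) (c : Int) : Int :=
  let vals := (PySem.List.pyRange 0 k 1).flatMap (fun i =>
    PySem.List.slice (PySem.List.pyGetD grid (r + i) []) (some c) (some (c + k)))
  match pvPairLoop vals none with
  | none => 0
  | some m => m

def minAbsDiff_alt (grid : List (List Int)) (k : Int) : List (List Int) :=
  let N : Int := PySem.List.len grid
  let M : Int := PySem.List.len (PySem.List.pyGetD grid 0 [])
  (PySem.List.pyRange 0 (N - k + 1) 1).map (fun r =>
    (PySem.List.pyRange 0 (M - k + 1) 1).map (fun c => pvCell grid k r c))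

-- ===== PRECONDITION & SPEC =====
-- Pre_ excludes the empty grid and, for 2 ≤ k ≤ min(N, M), grids with a row shorter than the
-- first (A raises IndexError there), and k ≤ 0, where A fills the result with float('inf') —
-- not int values.
def Pre_minAbsDiff (grid : List (List Int)) (k : Int) : Prop :=
  grid ≠ [] ∧ 1 ≤ k ∧
  (2 ≤ k → k ≤ (grid.length : Int) → k ≤ (grid.headI.length : Int) →
    ∀ row ∈ grid, grid.headI.length ≤ row.length)
instance (grid : List (List Int)) (k : Int) : Decidable (Pre_minAbsDiff grid k) := by
  unfold Pre_minAbsDiff; infer_instance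
def pvWitness_minAbsDiff : List (List Int) × Int := ([[1, 2], [3, 4]], 2)

def Spec_minAbsDiff (grid : List (List Int)) (k : Int) (out : List (List Int)) : Prop := out = minAbsDiff_alt grid k
instance (grid : List (List Int)) (k : Int) (out : List (List Int)) : Decidable (Spec_minAbsDiff grid k out) := by unfold Spec_minAbsDiff; infer_instance

-- ===== CLAIM (what is proved, stated in full; the proofs are below) =====
def Claim_equal_minAbsDiff : Prop := ∀ (grid : List (List Int)) (k : Int), Dom_minAbsDiff grid k → Pre_minAbsDiff grid k → Spec_minAbsDiff grid k (minAbsDiff grid k)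

-- ===== LEMMAS AND PROOFS =====

-- proof-side value of one cell of A's result (the body of A's inner loop, as a pure value)
def pvAcell (grid : List (List Int)) (k : Int) (row col : Int) : Int :=
  if k = 1 then 0
  else
    let unique : PySem.Set Int :=
      (PySem.List.pyRange 0 k 1).foldl (fun u i =>
        (PySem.List.pyRange 0 k 1).foldl (fun u j =>
          PySem.Set.add u (PySem.List.pyGetD (PySem.List.pyGetD grid (row + i) []) (col + j) 0)) u)
        PySem.Set.empty
    if PySem.Set.len unique = 1 then 0
    else
      let uniqueS := PySem.List.sorted unique (fun x => x) false
      (PySem.List.pyRange 1 (PySem.List.len uniqueS) 1).foldl (fun v i =>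
        min v (PySem.List.pyGetD uniqueS i 0 - PySem.List.pyGetD uniqueS (i - 1) 0))
        4611686018427387904

-- A's result in map form, cell by cell
theorem pvA_map (grid : List (List Int)) (k : Int) :
    minAbsDiff grid k =
      (PySem.List.pyRange 0 (PySem.List.len grid - k + 1) 1).map (fun row =>
        (PySem.List.pyRange 0 (PySem.List.len (PySem.List.pyGetD grid 0 []) - k + 1) 1).map
          (fun col => pvAcell grid k row col)) := by
  simp only [minAbsDiff]
  refine .trans (PySem.List.foldl_congr_mem _ _
      (fun res row => res ++
        [(PySem.List.pyRange 0 (PySem.List.len (PySem.List.pyGetD grid 0 []) - k + 1) 1).map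
          (fun col => pvAcell grid k row col)]) _ ?_) ?_
  · intro acc row _
    congr 2
    refine .trans (PySem.List.foldl_congr_mem _ _
        (fun cur col => cur ++ [pvAcell grid k row col]) _ ?_) ?_
    · intro cur col _
      by_cases hk : k = 1
      · simp [pvAcell, hk]
      · simp only [pvAcell, if_neg hk]
        split_ifs <;> rfl
    · simpa using PySem.List.foldl_append_singleton_eq_map _ _ []
  · simpa using PySem.List.foldl_append_singleton_eq_map _ _ []

-- the multiset of differences |x - y| over the (unordered) pairs of l, as Source B enumerates them
def pvDiffs : List Int → List Int
  | [] => []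
  | v :: rest => (rest.filter (fun u => decide (u ≠ v))).map (fun u => |u - v|) ++ pvDiffs rest

def pvAdj (m : List Int) : List Int := (m.zip m.tail).map (fun p => p.2 - p.1)

theorem pvOptMin_some (m d : Int) : pvOptMin (some m) d = some (min m d) := by
  simp only [pvOptMin]; split_ifs with h <;> simp [min_def] <;> omega

theorem pvFoldl_optMin_some (l : List Int) (m : Int) :
    l.foldl pvOptMin (some m) = some (l.foldl min m) := by
  induction l generalizing m with
  | nil => rfl
  | cons d t ih => simp [pvOptMin_some, ih]

theorem pvFoldl_optMin_none (l : List Int) :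
    l.foldl pvOptMin none = (match l with | [] => none | d :: t => some (t.foldl min d)) := by
  cases l with
  | nil => rfl
  | cons d t => simpa [pvOptMin] using pvFoldl_optMin_some t d

theorem pvPairLoop_eq (l : List Int) (b : Option Int) :
    pvPairLoop l b = (pvDiffs l).foldl pvOptMin b := by
  induction l generalizing b with
  | nil => rfl
  | cons v rest ih =>
    simp only [pvPairLoop, pvDiffs, List.foldl_append, ih, List.foldl_map, List.foldl_filter]
    congr 1
    apply PySem.List.foldl_congr_mem
    intro acc u _
    by_cases h : u = v <;> simp [h]

theorem pvFoldMin_le_init (l : List Int) (m : Int) : l.foldl min m ≤ m := by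
  induction l generalizing m with
  | nil => simp
  | cons d t ih => exact le_trans (ih _) (min_le_left _ _)

theorem pvFoldMin_le_mem (l : List Int) (m x : Int) : x ∈ l → l.foldl min m ≤ x := by
  induction l generalizing m with
  | nil => intro hx; simp at hx
  | cons d t ih =>
    intro hx
    simp only [List.foldl_cons]
    rcases List.mem_cons.1 hx with rfl | hx'
    · exact le_trans (pvFoldMin_le_init _ _) (min_le_right _ _)
    · exact ih _ hx'

theorem pvFoldMin_mem (l : List Int) (m : Int) : l.foldl min m = m ∨ l.foldl min m ∈ l := by
  induction l generalizing m with
  | nil => left; rfl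
  | cons d t ih =>
    simp only [List.foldl_cons]
    rcases ih (min m d) with h | h
    · rcases min_cases m d with ⟨he, -⟩ | ⟨he, -⟩
      · left; rw [h, he]
      · right; rw [h, he]; exact List.mem_cons_self
    · right; exact List.mem_cons_of_mem _ h

theorem pvFoldMin_le_cons (t : List Int) (d z : Int) (hz : z ∈ d :: t) : t.foldl min d ≤ z := by
  rcases List.mem_cons.1 hz with rfl | hz'
  · exact pvFoldMin_le_init _ _
  · exact pvFoldMin_le_mem _ _ _ hz'

theorem pvFoldMin_mem_cons (t : List Int) (d : Int) : t.foldl min d ∈ d :: t := by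
  rcases pvFoldMin_mem t d with h | h
  · simp [h]
  · exact List.mem_cons_of_mem _ h

theorem mem_pvDiffs (l : List Int) (x y : Int) (hx : x ∈ l) (hy : y ∈ l) (hne : x ≠ y) :
    |x - y| ∈ pvDiffs l := by
  induction l with
  | nil => simp at hx
  | cons v rest ih =>
    rcases List.mem_cons.1 hx with rfl | hx' <;> rcases List.mem_cons.1 hy with h | hy'
    · exact absurd h.symm hne
    · refine List.mem_append_left _ ?_
      rw [abs_sub_comm]
      exact List.mem_map.2 ⟨y, List.mem_filter.2 ⟨hy', by simpa using fun h => hne h.symm⟩, rfl⟩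
    · subst h
      exact List.mem_append_left _
        (List.mem_map.2 ⟨x, List.mem_filter.2 ⟨hx', by simpa using hne⟩, rfl⟩)
    · exact List.mem_append_right _ (ih hx' hy')

theorem pvDiffs_sub (l : List Int) (d : Int) (hd : d ∈ pvDiffs l) :
    ∃ x ∈ l, ∃ y ∈ l, x ≠ y ∧ d = |x - y| := by
  induction l with
  | nil => simp [pvDiffs] at hd
  | cons v rest ih =>
    rcases List.mem_append.1 hd with h | h
    · obtain ⟨u, hu, hd'⟩ := List.mem_map.1 h
      obtain ⟨hur, huv⟩ := List.mem_filter.1 hu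
      exact ⟨u, List.mem_cons_of_mem _ hur, v, List.mem_cons_self, by simpa using huv, hd'.symm⟩
    · obtain ⟨x, hx, y, hy, hne, he⟩ := ih h
      exact ⟨x, List.mem_cons_of_mem _ hx, y, List.mem_cons_of_mem _ hy, hne, he⟩

theorem pvAdj_cons₂ (a b : Int) (t : List Int) : pvAdj (a :: b :: t) = (b - a) :: pvAdj (b :: t) := rfl

-- in a strictly sorted list, every pair gap dominates some adjacent gap
theorem pvAdj_le (s : List Int) (hs : s.Pairwise (· < ·)) (x y : Int)
    (hx : x ∈ s) (hy : y ∈ s) (hxy : x < y) : ∃ g ∈ pvAdj s, g ≤ y - x := by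
  induction s with
  | nil => simp at hx
  | cons a t ih =>
    have hhead := (List.pairwise_cons.1 hs).1
    have htail := (List.pairwise_cons.1 hs).2
    rcases List.mem_cons.1 hx with hxa | hx'
    · rcases List.mem_cons.1 hy with hya | hy'
      · omega
      · cases t with
        | nil => simp at hy'
        | cons b t' =>
          refine ⟨b - a, by rw [pvAdj_cons₂]; exact List.mem_cons_self, ?_⟩
          rcases List.mem_cons.1 hy' with hyb | hy''
          · omega
          · have hby : b < y := (List.pairwise_cons.1 htail).1 y hy''
            omega
    · rcases List.mem_cons.1 hy with hya | hy'
      · have hax : a < x := hhead x hx'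
        omega
      · cases t with
        | nil => simp at hx'
        | cons b t' =>
          obtain ⟨g, hg, hle⟩ := ih htail hx' hy'
          exact ⟨g, by rw [pvAdj_cons₂]; exact List.mem_cons_of_mem _ hg, hle⟩

-- every adjacent gap of a strictly sorted list is a pair difference of its elements
theorem pvAdj_to_pair (s : List Int) (hs : s.Pairwise (· < ·)) (g : Int) (hg : g ∈ pvAdj s) :
    ∃ a ∈ s, ∃ b ∈ s, a < b ∧ g = b - a := by
  induction s with
  | nil => simp [pvAdj] at hg
  | cons a t ih =>
    cases t with
    | nil => simp [pvAdj] at hg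
    | cons b t' =>
      rcases List.mem_cons.1 (by simpa [pvAdj_cons₂] using hg) with rfl | hg'
      · exact ⟨a, List.mem_cons_self, b, List.mem_cons_of_mem _ (List.mem_cons_self),
          (List.pairwise_cons.1 hs).1 b (List.mem_cons_self), rfl⟩
      · obtain ⟨p, hp, q, hq, hlt, he⟩ := ih (List.pairwise_cons.1 hs).2 hg'
        exact ⟨p, List.mem_cons_of_mem _ hp, q, List.mem_cons_of_mem _ hq, hlt, he⟩

theorem pv_map_adj (d : List Int) :
    (PySem.List.pyRange 1 (PySem.List.len d) 1).map
        (fun i => PySem.List.pyGetD d i 0 - PySem.List.pyGetD d (i - 1) 0) = pvAdj d := by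
  apply List.ext_getElem
  · simp only [List.length_map, PySem.List.length_pyRange_one, pvAdj, PySem.List.len_eq,
      List.length_zip, List.length_tail]
    omega
  · intro t h1 h2
    simp only [List.length_map, PySem.List.length_pyRange_one, PySem.List.len_eq] at h1
    have hlen : t + 1 < d.length := by omega
    simp only [List.getElem_map, PySem.List.getElem_pyRange_one, pvAdj, List.getElem_zip,
      List.getElem_tail]
    rw [PySem.List.pyGetD_eq_getElem d 0 (by omega) (by omega),
        PySem.List.pyGetD_eq_getElem d 0 (by omega) (by omega)]
    congr 2 <;> omega

-- A's min-loop as a fold of min over the adjacent gaps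
theorem pvA_fold_eq (d : List Int) :
    (PySem.List.pyRange 1 (PySem.List.len d) 1).foldl (fun v i =>
        min v (PySem.List.pyGetD d i 0 - PySem.List.pyGetD d (i - 1) 0)) 4611686018427387904
      = (pvAdj d).foldl min 4611686018427387904 := by
  rw [← List.foldl_map (f := fun i => PySem.List.pyGetD d i 0 - PySem.List.pyGetD d (i - 1) 0)
      (g := fun v x => min v x), pv_map_adj]

theorem pv_foldl_nested {α β γ : Type} (f : γ → β → γ) (g : α → List β) (l : List α) (init : γ) :
    l.foldl (fun u i => (g i).foldl f u) init = (l.flatMap g).foldl f init := by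
  induction l generalizing init with
  | nil => rfl
  | cons a l ih => simp [List.flatMap_cons, List.foldl_append, ih]

theorem pvGetD_cases {α : Type} (l : List α) (i : Int) (d : α) :
    PySem.List.pyGetD l i d ∈ l ∨ PySem.List.pyGetD l i d = d := by
  by_cases h : PySem.Raise.InRange l.length i
  · exact Or.inl (PySem.List.pyGetD_mem _ _ h)
  · exact Or.inr (PySem.List.pyGetD_of_none _ _ _ ((PySem.List.pyGet?_eq_none_iff _ _).2 h))


theorem pv_set_eq (k : Int) (e : Int → Int → Int) :
    (PySem.List.pyRange 0 k 1).foldl (fun u i =>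
        (PySem.List.pyRange 0 k 1).foldl (fun u j => PySem.Set.add u (e i j)) u)
      PySem.Set.empty
    = PySem.Set.ofList ((PySem.List.pyRange 0 k 1).flatMap
        (fun i => (PySem.List.pyRange 0 k 1).map (e i))) := by
  refine .trans (PySem.List.foldl_congr_mem _ _
      (fun u i => ((PySem.List.pyRange 0 k 1).map (e i)).foldl PySem.Set.add u) _ ?_) ?_
  · intro u i _
    simp only [List.foldl_map]
  · rw [pv_foldl_nested]; rfl

-- the heart: A's dedup-sort-adjacent-gap value equals B's pairwise-scan value, for any window list
theorem pv_core (vals : List Int)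
    (hbd : ∀ v ∈ vals, -2147483648 ≤ v ∧ v ≤ 2147483648) (hne : vals ≠ []) :
    (if PySem.Set.len (PySem.Set.ofList vals) = 1 then (0 : Int)
     else
       (PySem.List.pyRange 1
           (PySem.List.len (PySem.List.sorted (PySem.Set.ofList vals) (fun x => x) false)) 1).foldl
         (fun v i =>
           min v (PySem.List.pyGetD (PySem.List.sorted (PySem.Set.ofList vals) (fun x => x) false) i 0
             - PySem.List.pyGetD (PySem.List.sorted (PySem.Set.ofList vals) (fun x => x) false) (i - 1) 0))
         4611686018427387904)
    = (match pvPairLoop vals none with | none => 0 | some m => m) := by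
  rw [pvPairLoop_eq, pvFoldl_optMin_none]
  have hmemS : ∀ x, x ∈ PySem.List.sorted (PySem.Set.ofList vals) (fun x => x) false ↔ x ∈ vals := by
    intro x
    rw [PySem.List.mem_sorted, PySem.Set.mem_ofList]
  by_cases h1 : PySem.Set.len (PySem.Set.ofList vals) = 1
  · rw [if_pos h1]
    have hlen1 : (PySem.Set.ofList vals).length = 1 := by
      simpa [PySem.Set.len] using h1
    obtain ⟨z, hz⟩ := List.length_eq_one_iff.1 hlen1
    have hall : ∀ x ∈ vals, ∀ y ∈ vals, x = y := by
      intro x hx y hy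
      have hx' : x ∈ PySem.Set.ofList vals := (PySem.Set.mem_ofList vals x).2 hx
      have hy' : y ∈ PySem.Set.ofList vals := (PySem.Set.mem_ofList vals y).2 hy
      rw [hz] at hx' hy'
      simp at hx' hy'
      omega
    have hdnil : pvDiffs vals = [] := by
      rcases h : pvDiffs vals with _ | ⟨d, t⟩
      · rfl
      · have hd : d ∈ pvDiffs vals := by rw [h]; exact List.mem_cons_self
        obtain ⟨x, hx, y, hy, hxy, -⟩ := pvDiffs_sub _ _ hd
        exact absurd (hall x hx y hy) hxy
    rw [hdnil]
  · rw [if_neg h1]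
    have hpw := PySem.List.sorted_ofList_pairwise_lt vals
    have hlen2 : 2 ≤ (PySem.List.sorted (PySem.Set.ofList vals) (fun x => x) false).length := by
      rw [PySem.List.length_sorted]
      obtain ⟨v, hv⟩ := List.exists_mem_of_ne_nil vals hne
      have hv' : v ∈ PySem.Set.ofList vals := (PySem.Set.mem_ofList vals v).2 hv
      have h1' : (PySem.Set.ofList vals).length ≠ 1 := by
        intro h; exact h1 (by simp [PySem.Set.len, h])
      have := List.length_pos_of_mem hv'
      omega
    rw [pvA_fold_eq]
    obtain ⟨x, y, u, hsxy⟩ : ∃ x y u,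
        PySem.List.sorted (PySem.Set.ofList vals) (fun x => x) false = x :: y :: u := by
      rcases hs : PySem.List.sorted (PySem.Set.ofList vals) (fun x => x) false with _ | ⟨x, _ | ⟨y, u⟩⟩
      · rw [hs] at hlen2; simp at hlen2
      · rw [hs] at hlen2; simp at hlen2
      · exact ⟨x, y, u, rfl⟩
    rw [hsxy] at hpw hmemS ⊢
    have hxy : x < y := (List.pairwise_cons.1 hpw).1 y List.mem_cons_self
    have hxv : x ∈ vals := (hmemS x).1 List.mem_cons_self
    have hyv : y ∈ vals := (hmemS y).1 (List.mem_cons_of_mem _ List.mem_cons_self)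
    have hxb := hbd x hxv
    have hyb := hbd y hyv
    rw [pvAdj_cons₂, List.foldl_cons,
        min_eq_right (by omega : y - x ≤ (4611686018427387904 : Int))]
    -- B's diff list is nonempty
    rcases hD : pvDiffs vals with _ | ⟨d2, t2⟩
    · exfalso
      have hmm : |x - y| ∈ pvDiffs vals := mem_pvDiffs vals x y hxv hyv (by omega)
      rw [hD] at hmm; simp at hmm
    · show List.foldl min (y - x) (pvAdj (y :: u)) = List.foldl min d2 t2
      -- antisymmetry between the two fold-minima
      have hAmem : (pvAdj (y :: u)).foldl min (y - x) ∈ pvAdj (x :: y :: u) := by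
        rw [pvAdj_cons₂]; exact pvFoldMin_mem_cons _ _
      obtain ⟨a, ha, b, hb, hab, hAe⟩ := pvAdj_to_pair _ hpw _ hAmem
      have hABd : (pvAdj (y :: u)).foldl min (y - x) ∈ d2 :: t2 := by
        rw [← hD, hAe, show b - a = |a - b| by rw [abs_sub_comm]; exact (abs_of_nonneg (by omega)).symm]
        exact mem_pvDiffs vals a b ((hmemS a).1 ha) ((hmemS b).1 hb) (by omega)
      have hBA : t2.foldl min d2 ≤ (pvAdj (y :: u)).foldl min (y - x) :=
        pvFoldMin_le_cons _ _ _ hABd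
      have hBmem : t2.foldl min d2 ∈ pvDiffs vals := by
        rw [hD]; exact pvFoldMin_mem_cons _ _
      obtain ⟨p, hp, q, hq, hpq, hBe⟩ := pvDiffs_sub _ _ hBmem
      have hAB : (pvAdj (y :: u)).foldl min (y - x) ≤ t2.foldl min d2 := by
        rcases lt_or_gt_of_ne hpq with hlt | hgt
        · obtain ⟨g, hg, hgle⟩ := pvAdj_le _ hpw p q ((hmemS p).2 hp) ((hmemS q).2 hq) hlt
          have hgl : (pvAdj (y :: u)).foldl min (y - x) ≤ g := by
            rw [pvAdj_cons₂] at hg; exact pvFoldMin_le_cons _ _ _ hg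
          have : |p - q| = q - p := by rw [abs_sub_comm]; exact abs_of_nonneg (by omega)
          omega
        · obtain ⟨g, hg, hgle⟩ := pvAdj_le _ hpw q p ((hmemS q).2 hq) ((hmemS p).2 hp) hgt
          have hgl : (pvAdj (y :: u)).foldl min (y - x) ≤ g := by
            rw [pvAdj_cons₂] at hg; exact pvFoldMin_le_cons _ _ _ hg
          have : |p - q| = p - q := abs_of_nonneg (by omega)
          omega
      omega

-- the per-cell equivalence
theorem pvFlatMap_congr {α β : Type} (l : List α) (f g : α → List β)
    (h : ∀ x ∈ l, f x = g x) : l.flatMap f = l.flatMap g := by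
  induction l with
  | nil => rfl
  | cons a t ih =>
    simp only [List.flatMap_cons, h a List.mem_cons_self,
      ih (fun x hx => h x (List.mem_cons_of_mem _ hx))]

theorem pv_map_slice (xs : List Int) (c kk : Int) (hc : 0 ≤ c) (hk : 0 ≤ kk)
    (hlen : c + kk ≤ (xs.length : Int)) :
    (PySem.List.pyRange 0 kk 1).map (fun j => PySem.List.pyGetD xs (c + j) 0)
      = PySem.List.slice xs (some c) (some (c + kk)) := by
  rw [PySem.List.slice_toNat xs hc (by omega)]
  apply List.ext_getElem
  · simp [PySem.List.length_pyRange_one]; omega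
  · intro t h1 h2
    simp only [List.length_map, PySem.List.length_pyRange_one] at h1
    simp only [List.getElem_map, PySem.List.getElem_pyRange_one]
    rw [PySem.List.pyGetD_eq_getElem xs 0 (by omega) (by omega)]
    rw [List.getElem_take, List.getElem_drop]
    congr 2
    omega

theorem pv_cell_eq (grid : List (List Int)) (k : Int) (r c : Int)
    (hdom : Dom_minAbsDiff grid k) (hpre : Pre_minAbsDiff grid k)
    (hr0 : 0 ≤ r) (hrN : r < PySem.List.len grid - k + 1)
    (hc0 : 0 ≤ c) (hcM : c < PySem.List.len (PySem.List.pyGetD grid 0 []) - k + 1) :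
    pvAcell grid k r c = pvCell grid k r c := by
  obtain ⟨hgne, hk1le, hrag⟩ := hpre
  by_cases hk1 : k = 1
  · subst hk1
    have h01 : PySem.List.pyRange 0 1 1 = [0] := by decide
    have hlen : (PySem.List.slice (PySem.List.pyGetD grid (r + 0) []) (some c)
        (some (c + 1))).length ≤ 1 := by
      rw [PySem.List.slice_toNat _ hc0 (by omega)]
      calc (List.take ((c + 1).toNat - c.toNat) _).length ≤ (c + 1).toNat - c.toNat :=
            List.length_take_le _ _
        _ ≤ 1 := by omega
    simp only [pvAcell, pvCell, h01, List.flatMap_cons, List.flatMap_nil,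
      List.append_nil]
    rcases hsl : PySem.List.slice (PySem.List.pyGetD grid (r + 0) []) (some c) (some (c + 1)) with
      _ | ⟨v, _ | ⟨w, t⟩⟩
    · simp [pvPairLoop]
    · simp [pvPairLoop]
    · rw [hsl] at hlen; simp at hlen
  · -- k ≥ 2: every window row is long enough, so the slice IS the k indexed entries
    have hk2 : 2 ≤ k := by omega
    have hN : PySem.List.len grid = (grid.length : Int) := PySem.List.len_eq _
    have hM0 : PySem.List.pyGetD grid 0 [] = grid.headI := by
      cases grid with
      | nil => exact absurd rfl hgne
      | cons g gs => simp [PySem.List.pyGetD_zero_cons]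
    have hkN : k ≤ (grid.length : Int) := by rw [hN] at hrN; omega
    have hkM : k ≤ (grid.headI.length : Int) := by
      rw [hM0, PySem.List.len_eq] at hcM; omega
    have hrows := hrag hk2 hkN hkM
    have hveq : ∀ i ∈ PySem.List.pyRange 0 k 1,
        PySem.List.slice (PySem.List.pyGetD grid (r + i) []) (some c) (some (c + k))
          = (PySem.List.pyRange 0 k 1).map
              (fun j => PySem.List.pyGetD (PySem.List.pyGetD grid (r + i) []) (c + j) 0) := by
      intro i hi
      rw [PySem.List.mem_pyRange_one] at hi
      have hrow : PySem.List.pyGetD grid (r + i) [] ∈ grid := by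
        refine PySem.List.pyGetD_mem _ _ ⟨by omega, by rw [hN] at hrN; omega⟩
      have hrl := hrows _ hrow
      rw [hM0, PySem.List.len_eq] at hcM
      exact (pv_map_slice _ c k hc0 (by omega) (by omega)).symm
    have hbd : ∀ v ∈ (PySem.List.pyRange 0 k 1).flatMap (fun i =>
        (PySem.List.pyRange 0 k 1).map (fun j =>
          PySem.List.pyGetD (PySem.List.pyGetD grid (r + i) []) (c + j) 0)),
        -2147483648 ≤ v ∧ v ≤ 2147483648 := by
      intro v hv
      obtain ⟨i, -, hv2⟩ := List.mem_flatMap.1 hv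
      obtain ⟨j, -, rfl⟩ := List.mem_map.1 hv2
      rcases pvGetD_cases (PySem.List.pyGetD grid (r + i) []) (c + j) 0 with hmem | hdef
      · rcases pvGetD_cases grid (r + i) [] with hrow | hrow
        · simp only [Dom_minAbsDiff, Bool.and_eq_true, List.all_eq_true, pvDomInt,
            decide_eq_true_eq] at hdom
          exact hdom.1 _ hrow _ hmem
        · rw [hrow] at hmem; simp at hmem
      · rw [hdef]; omega
    have hne : (PySem.List.pyRange 0 k 1).flatMap (fun i =>
        (PySem.List.pyRange 0 k 1).map (fun j =>
          PySem.List.pyGetD (PySem.List.pyGetD grid (r + i) []) (c + j) 0)) ≠ [] := by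
      have h0 : (0 : Int) ∈ PySem.List.pyRange 0 k 1 :=
        PySem.List.mem_pyRange_one.2 ⟨le_refl 0, by omega⟩
      intro h
      have hmm : PySem.List.pyGetD (PySem.List.pyGetD grid (r + 0) []) (c + 0) 0 ∈
          (PySem.List.pyRange 0 k 1).flatMap (fun i =>
            (PySem.List.pyRange 0 k 1).map (fun j =>
              PySem.List.pyGetD (PySem.List.pyGetD grid (r + i) []) (c + j) 0)) :=
        List.mem_flatMap.2 ⟨0, h0, List.mem_map.2 ⟨0, h0, rfl⟩⟩
      rw [h] at hmm; simp at hmm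
    simp only [pvAcell, pvCell, if_neg hk1, pv_set_eq, pvFlatMap_congr _ _ _ hveq]
    exact pv_core _ hbd hne

-- ===== VERDICT (by name: the statement is the Claim_ definition above) =====
theorem minAbsDiff_spec : Claim_equal_minAbsDiff := by
  intro grid k hdom hpre
  unfold Spec_minAbsDiff
  rw [pvA_map]
  simp only [minAbsDiff_alt]
  apply List.map_congr_left
  intro row hrow
  apply List.map_congr_left
  intro col hcol
  rw [PySem.List.mem_pyRange_one] at hrow hcol
  exact pv_cell_eq grid k row col hdom hpre hrow.1 hrow.2 hcol.1 hcol.2
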